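-- pv_equiv track=rewrite | github.com/ClickHouse/clickhousectl | scripts/update-models-optionality.py | pascalize
-- ===== SOURCE A (Python) =====
-- def pascalize(name: str) -> str:
--     """Convert to PascalCase, matching the Rust test convention."""
--     result = []
--     upper_next = True
--     for ch in name:
--         if ch.isalnum():
--             result.append(ch.upper() if upper_next else ch)
--             upper_next = False
--         else:
--             upper_next = True
--     return "".join(result)
-- ===== SOURCE B (Python) =====
-- def pascalize(name: str) -> str:
--     """Convert to PascalCase, matching the Rust test convention."""
--     out = []
--     i, n = 0, len(name)
--     while i < n:
--         if name[i].isalnum():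
--             j = i + 1
--             while j < n and name[j].isalnum():
--                 j += 1
--             out.append(name[i].upper() + name[i + 1:j])
--             i = j
--         else:
--             i += 1
--     return "".join(out)
-- ===== Notes on version B (the rewrite author's own statement) =====
-- stated objective: alternative
-- what changed: B extracts maximal alphanumeric runs (words) with an inner scan and emits word[0].upper()+word[1:] per word, instead of A's single-pass upper_next flag machine over characters.
import Mathlib
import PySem

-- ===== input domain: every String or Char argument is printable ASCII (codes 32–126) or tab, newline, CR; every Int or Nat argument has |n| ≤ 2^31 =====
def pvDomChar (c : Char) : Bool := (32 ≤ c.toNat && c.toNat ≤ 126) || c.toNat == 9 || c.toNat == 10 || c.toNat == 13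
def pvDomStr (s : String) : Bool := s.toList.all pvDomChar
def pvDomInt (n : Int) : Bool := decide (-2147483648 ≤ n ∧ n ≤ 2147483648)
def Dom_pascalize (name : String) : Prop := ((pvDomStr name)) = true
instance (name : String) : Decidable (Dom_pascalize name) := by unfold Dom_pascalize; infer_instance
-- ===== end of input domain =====

-- B extracts maximal alphanumeric runs and capitalizes each word's head, instead of A's upper_next flag machine (objective: alternative).


-- ===== PORT A =====
-- A's loop over the characters with the upper_next flag, transcribed as structural recursion.
def pvGoA : List Char → Bool → List Char
  | [], _ => []
  | c :: rest, upperNext =>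
    if PySem.Chars.isalnum c then
      (if upperNext then PySem.Chars.upperChar c else c) :: pvGoA rest false
    else
      pvGoA rest true

def pascalize (name : String) : String := String.ofList (pvGoA name.toList true)

-- ===== PORT B =====
-- B's outer while loop: at an alnum char, the inner while scans to the end of the run
-- (takeWhile/dropWhile = the scan to index j), emit head.upper() ++ rest-of-run, resume at j.
def pvWordsB : List Char → List Char
  | [] => []
  | c :: rest =>
    if PySem.Chars.isalnum c then
      PySem.Chars.upperChar c :: rest.takeWhile PySem.Chars.isalnum
        ++ pvWordsB (rest.dropWhile PySem.Chars.isalnum)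
    else
      pvWordsB rest
termination_by l => l.length
decreasing_by
  · exact Nat.lt_succ_of_le (List.length_dropWhile_le PySem.Chars.isalnum rest)
  · simp

def pascalize_alt (name : String) : String := String.ofList (pvWordsB name.toList)

-- ===== PRECONDITION & SPEC =====
def Spec_pascalize (name : String) (out : String) : Prop := out = pascalize_alt name
instance (name : String) (out : String) : Decidable (Spec_pascalize name out) := by unfold Spec_pascalize; infer_instance

-- ===== CLAIM (what is proved, stated in full; the proofs are below) =====
def Claim_equal_pascalize : Prop := ∀ (name : String), Dom_pascalize name → Spec_pascalize name (pascalize name)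

-- ===== LEMMAS AND PROOFS =====

-- Inside a word (flag down), A copies the rest of the alnum run and then restarts with the flag up.
theorem pvGoA_false (l : List Char) :
    pvGoA l false
      = l.takeWhile PySem.Chars.isalnum
        ++ pvGoA (l.dropWhile PySem.Chars.isalnum) true := by
  induction l with
  | nil => simp [pvGoA]
  | cons c rest ih =>
    by_cases h : PySem.Chars.isalnum c = true
    · simp [pvGoA, h, ih]
    · simp [pvGoA, h]

theorem pvGoA_true_eq_words : ∀ (n : Nat) (l : List Char), l.length ≤ n →
    pvGoA l true = pvWordsB l := by
  intro n
  induction n with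
  | zero =>
    intro l hl
    have : l = [] := List.eq_nil_of_length_eq_zero (Nat.le_zero.mp hl)
    simp [this, pvGoA, pvWordsB]
  | succ n ih =>
    intro l hl
    cases l with
    | nil => simp [pvGoA, pvWordsB]
    | cons c rest =>
      by_cases h : PySem.Chars.isalnum c = true
      · have hlen : (rest.dropWhile PySem.Chars.isalnum).length ≤ n :=
          le_trans (List.length_dropWhile_le _ _) (Nat.le_of_succ_le_succ hl)
        simp [pvGoA, pvWordsB, h, pvGoA_false, ih _ hlen]
      · simp [pvGoA, pvWordsB, h, ih rest (Nat.le_of_succ_le_succ hl)]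

-- ===== VERDICT (by name: the statement is the Claim_ definition above) =====
theorem pascalize_spec : Claim_equal_pascalize := by
  intro name _
  unfold Spec_pascalize pascalize pascalize_alt
  rw [pvGoA_true_eq_words name.toList.length name.toList le_rfl]
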